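-- pv_equiv track=rewrite | github.com/coalboss/MISP-QEKS | model/fadata.py | find_common_indices
-- ===== SOURCE A (Python) =====
-- def find_common_indices(list1, list2):
--     common_indices_1 = []
--     common_indices_2 = []
--
--     start_idx2 = 0
--
--     for idx1, elem1 in enumerate(list1):
--         for idx2 in range(start_idx2, len(list2)):
--             if elem1 == list2[idx2]:
--                 common_indices_1.append(idx1)
--                 common_indices_2.append(idx2)
--                 start_idx2 = idx2 + 1
--                 break
--
--     return common_indices_1, common_indices_2
-- ===== SOURCE B (Python) =====
-- def find_common_indices(list1, list2):
--     # value -> list of its positions in list2 (increasing); consumed from the front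
--     positions = {}
--     for j, v in enumerate(list2):
--         positions.setdefault(v, []).append(j)
--
--     common_indices_1 = []
--     common_indices_2 = []
--     start = 0
--     for i, v in enumerate(list1):
--         ps = positions.get(v)
--         if not ps:
--             continue
--         k = 0
--         while k < len(ps) and ps[k] < start:
--             k += 1
--         del ps[:k]
--         if ps:
--             j = ps[0]
--             del ps[:1]
--             common_indices_1.append(i)
--             common_indices_2.append(j)
--             start = j + 1
--     return common_indices_1, common_indices_2
-- ===== Notes on version B (the rewrite author's own statement) =====
-- stated objective: faster
-- what changed: replaces the per-element rescan of list2 with a value->positions index built once, each lookup consuming already-passed positions from the front, so list2 is traversed once overall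
import Mathlib
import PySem

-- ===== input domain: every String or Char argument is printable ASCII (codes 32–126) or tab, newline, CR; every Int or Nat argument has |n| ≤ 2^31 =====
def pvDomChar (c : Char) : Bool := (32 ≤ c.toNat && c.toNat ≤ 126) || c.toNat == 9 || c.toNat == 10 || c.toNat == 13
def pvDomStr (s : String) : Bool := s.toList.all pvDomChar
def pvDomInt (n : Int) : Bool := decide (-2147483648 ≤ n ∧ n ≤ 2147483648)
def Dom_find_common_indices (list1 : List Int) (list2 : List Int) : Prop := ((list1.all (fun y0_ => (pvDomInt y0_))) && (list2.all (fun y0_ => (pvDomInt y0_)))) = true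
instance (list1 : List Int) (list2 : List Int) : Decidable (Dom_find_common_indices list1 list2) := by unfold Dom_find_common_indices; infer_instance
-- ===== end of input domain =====

-- B replaces A's per-element rescan of list2 by a value→positions index built once and consumed
-- from the front (objective: faster, asymptotic).

-- ===== PORT A =====
-- inner 'for idx2 in range(start_idx2, len(list2)): if elem1 == list2[idx2]: … break'
def pvInnerA (list2 : List Int) (v : Int) (j : Nat) : Option Nat :=
  if h : j < list2.length then
    if list2[j] = v then some j else pvInnerA list2 v (j + 1)
  else none
termination_by list2.length - j

-- outer 'for idx1, elem1 in enumerate(list1)' with the two accumulators and start_idx2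
def pvGoA (list2 : List Int) : List Int → Nat → Nat → List Int → List Int → List Int × List Int
  | [], _, _, c1, c2 => (c1, c2)
  | v :: rest, i, s, c1, c2 =>
    match pvInnerA list2 v s with
    | some j => pvGoA list2 rest (i + 1) (j + 1) (c1 ++ [(i : Int)]) (c2 ++ [(j : Int)])
    | none   => pvGoA list2 rest (i + 1) s c1 c2

def find_common_indices (list1 : List Int) (list2 : List Int) : List Int × List Int :=
  pvGoA list2 list1 0 0 [] []

-- ===== PORT B =====
-- 'for j, v in enumerate(list2): positions.setdefault(v, []).append(j)'
def pvBuildPos : List Int → Nat → PySem.Dict Int (List Nat) → PySem.Dict Int (List Nat)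
  | [], _, d => d
  | v :: rest, j, d => pvBuildPos rest (j + 1) (d.insert v (d.getD v [] ++ [j]))

-- main loop of B: dict lookup, trim consumed positions (the while/del), take the front
def pvGoB : List Int → Nat → Nat → PySem.Dict Int (List Nat) → List Int → List Int → List Int × List Int
  | [], _, _, _, c1, c2 => (c1, c2)
  | v :: rest, i, s, d, c1, c2 =>
    match d.get? v with
    | none => pvGoB rest (i + 1) s d c1 c2
    | some ps =>
      if ps.isEmpty then pvGoB rest (i + 1) s d c1 c2
      else
        -- 'while k < len(ps) and ps[k] < start: k += 1; del ps[:k]'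
        match ps.dropWhile (fun j => j < s) with
        | [] => pvGoB rest (i + 1) s (d.insert v []) c1 c2
        | j :: restp =>
          pvGoB rest (i + 1) (j + 1) (d.insert v restp) (c1 ++ [(i : Int)]) (c2 ++ [(j : Int)])

def find_common_indices_alt (list1 : List Int) (list2 : List Int) : List Int × List Int :=
  pvGoB list1 0 0 (pvBuildPos list2 0 PySem.Dict.empty) [] []

-- ===== PRECONDITION & SPEC =====
def Spec_find_common_indices (list1 : List Int) (list2 : List Int) (out : List Int × List Int) : Prop := out = find_common_indices_alt list1 list2
instance (list1 : List Int) (list2 : List Int) (out : List Int × List Int) : Decidable (Spec_find_common_indices list1 list2 out) := by unfold Spec_find_common_indices; infer_instance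

-- ===== CLAIM (what is proved, stated in full; the proofs are below) =====
def Claim_equal_find_common_indices : Prop := ∀ (list1 : List Int) (list2 : List Int), Dom_find_common_indices list1 list2 → Spec_find_common_indices list1 list2 (find_common_indices list1 list2)

-- ===== LEMMAS AND PROOFS =====

-- positions of v in l, indices starting at j0
def pvPos : List Int → Nat → Int → List Nat
  | [], _, _ => []
  | a :: rest, j, v => if a = v then j :: pvPos rest (j + 1) v else pvPos rest (j + 1) v

-- innerA equals head of positions of the dropped suffix
theorem pvInnerA_eq (l2 : List Int) (v : Int) (s : Nat) :
    pvInnerA l2 v s = (pvPos (l2.drop s) s v).head? := by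
  rw [pvInnerA]
  split
  · rename_i h
    rw [List.drop_eq_getElem_cons h]
    simp only [pvPos]
    split
    · simp
    · rw [pvInnerA_eq l2 v (s + 1)]
  · rename_i h
    rw [List.drop_eq_nil_of_le (by omega)]
    simp [pvPos]
termination_by l2.length - s

-- dropWhile over positions with all-small prefix
theorem pvDropWhile_pos_ge (l : List Int) (v : Int) (s : Nat) :
    ∀ j0, s ≤ j0 → (pvPos l j0 v).dropWhile (fun j => j < s) = pvPos l j0 v := by
  induction l with
  | nil => simp [pvPos]
  | cons a rest ih =>
    intro j0 h
    simp only [pvPos]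
    split
    · rw [List.dropWhile_cons]
      simp [Nat.not_lt.mpr h]
    · exact ih (j0 + 1) (by omega)

theorem pvDropWhile_pos (l : List Int) (v : Int) (s : Nat) :
    ∀ j0, j0 ≤ s →
      (pvPos l j0 v).dropWhile (fun j => j < s) = pvPos (l.drop (s - j0)) s v := by
  induction l with
  | nil => simp [pvPos]
  | cons a rest ih =>
    intro j0 hle
    by_cases hj : j0 = s
    · subst hj
      simp only [Nat.sub_self, List.drop_zero]
      exact pvDropWhile_pos_ge (a :: rest) v j0 j0 le_rfl
    · have hlt : j0 < s := lt_of_le_of_ne hle hj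
      have hsub : s - j0 = (s - (j0 + 1)) + 1 := by omega
      rw [hsub, List.drop_succ_cons]
      simp only [pvPos]
      split
      · rw [List.dropWhile_cons]
        simp only [hlt, decide_true, if_true]
        exact ih (j0 + 1) (by omega)
      · exact ih (j0 + 1) (by omega)

theorem pvDropWhile_dropWhile {s t : Nat} (h : s ≤ t) (l : List Nat) :
    (l.dropWhile (fun j => j < s)).dropWhile (fun j => j < t) = l.dropWhile (fun j => j < t) := by
  induction l with
  | nil => simp
  | cons a tl ih =>
    by_cases ha : a < s
    · have hat : a < t := lt_of_lt_of_le ha h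
      simp [ha, hat, ih]
    · simp [List.dropWhile_cons, ha]

theorem pvBuildPos_getD (l : List Int) (v : Int) :
    ∀ j0 d, (pvBuildPos l j0 d).getD v [] = d.getD v [] ++ pvPos l j0 v := by
  induction l with
  | nil => simp [pvBuildPos, pvPos]
  | cons a rest ih =>
    intro j0 d
    simp only [pvBuildPos]
    rw [ih]
    simp only [pvPos]
    by_cases hv : a = v
    · subst hv
      rw [PySem.Dict.getD_insert_self, if_pos rfl, List.append_assoc]
      rfl
    · rw [PySem.Dict.getD_insert_of_ne d _ _ (Ne.symm hv), if_neg hv]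

def pvInv (l2 : List Int) (d : PySem.Dict Int (List Nat)) (s : Nat) : Prop :=
  ∀ v : Int, (d.getD v []).dropWhile (fun j => j < s) = (pvPos l2 0 v).dropWhile (fun j => j < s)

theorem pvMain (l2 : List Int) (rest : List Int) :
    ∀ i s d c1 c2, pvInv l2 d s →
      pvGoA l2 rest i s c1 c2 = pvGoB rest i s d c1 c2 := by
  induction rest with
  | nil => intro i s d c1 c2 _; simp [pvGoA, pvGoB]
  | cons v r ih =>
    intro i s d c1 c2 hInv
    have hv := hInv v
    have hkey : pvInnerA l2 v s = ((d.getD v []).dropWhile (fun j => j < s)).head? := by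
      rw [pvInnerA_eq, hv, pvDropWhile_pos l2 v s 0 (Nat.zero_le s), Nat.sub_zero]
    simp only [pvGoA, pvGoB]
    cases hget : d.get? v with
    | none =>
      have hgd : d.getD v [] = [] := PySem.Dict.getD_of_get?_eq_none d [] hget
      rw [hkey, hgd]
      simp only [List.dropWhile_nil, List.head?_nil]
      exact ih (i + 1) s d c1 c2 hInv
    | some ps =>
      have hgd : d.getD v [] = ps := PySem.Dict.getD_of_get?_eq_some d [] hget
      cases ps with
      | nil =>
        rw [hkey, hgd]
        simp only [List.dropWhile_nil, List.head?_nil]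
        exact ih (i + 1) s d c1 c2 hInv
      | cons p pt =>
        show (match pvInnerA l2 v s with
              | some j => pvGoA l2 r (i + 1) (j + 1) (c1 ++ [(i : Int)]) (c2 ++ [(j : Int)])
              | none => pvGoA l2 r (i + 1) s c1 c2) =
             (match (p :: pt).dropWhile (fun j => j < s) with
              | [] => pvGoB r (i + 1) s (d.insert v []) c1 c2
              | j :: restp => pvGoB r (i + 1) (j + 1) (d.insert v restp) (c1 ++ [(i : Int)]) (c2 ++ [(j : Int)]))
        cases hD : (p :: pt).dropWhile (fun j => j < s) with
        | nil =>
          rw [hkey, hgd, hD]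
          simp only [List.head?_nil]
          refine ih (i + 1) s (d.insert v []) c1 c2 ?_
          intro u
          by_cases hu : u = v
          · subst hu
            rw [PySem.Dict.getD_insert_self]
            rw [← hv, hgd, hD]
            simp
          · rw [PySem.Dict.getD_insert_of_ne d _ _ hu]
            exact hInv u
        | cons j restp =>
          rw [hkey, hgd, hD]
          simp only [List.head?_cons]
          refine ih (i + 1) (j + 1) (d.insert v restp) (c1 ++ [(i : Int)]) (c2 ++ [(j : Int)]) ?_
          have hst : s ≤ j + 1 := by
            have h1 := List.head?_dropWhile_not (fun x => decide (x < s)) (p :: pt)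
            rw [hD] at h1
            simp only [List.head?_cons] at h1
            simp only [decide_eq_false_iff_not] at h1
            omega
          intro u
          by_cases hu : u = v
          · subst hu
            rw [PySem.Dict.getD_insert_self]
            rw [← pvDropWhile_dropWhile hst (pvPos l2 0 u), ← hv, hgd, hD]
            rw [List.dropWhile_cons]
            simp
          · rw [PySem.Dict.getD_insert_of_ne d _ _ hu]
            rw [← pvDropWhile_dropWhile hst (pvPos l2 0 u), ← pvDropWhile_dropWhile hst (d.getD u []), hInv u]

-- ===== VERDICT (by name: the statement is the Claim_ definition above) =====
theorem find_common_indices_spec : Claim_equal_find_common_indices := by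
  intro l1 l2 _
  unfold Spec_find_common_indices find_common_indices find_common_indices_alt
  apply pvMain
  intro v
  rw [pvBuildPos_getD]
  simp
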